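-- pv_equiv track=rewrite | github.com/OnDzmitry/crypto | Lab3/My.py | convert
-- ===== SOURCE A (Python) =====
-- import operator
--
-- def convert(alph, key):
--     length = len(alph)
--     temp_dict = {}
--     output = ''
--
--     for i, j in enumerate(alph):
--         temp_dict[j] = int((i**3*key+length*key+i*(length*(i**4)-key))%1000)
--     temp_dict = sorted(temp_dict.items(), key=operator.itemgetter(1))
--     for i in temp_dict:
--         output += i[0]
--
--     return output
-- ===== SOURCE B (Python) =====
-- def convert(alph, key):
--     n = len(alph)
--     buckets = [''] * 1000
--     for ch in dict.fromkeys(alph):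
--         i = alph.rfind(ch)
--         buckets[(key * (i**3 - i + n) + n * i**5) % 1000] += ch
--     return ''.join(buckets)
-- ===== Notes on version B (the rewrite author's own statement) =====
-- stated objective: faster
-- what changed: B drops A's char->value dict and comparison sort entirely: it walks the distinct characters in first-occurrence order (dict.fromkeys), recomputes each character's value at its last occurrence via rfind with an algebraically regrouped formula, and stably counting-sorts them into 1000 buckets indexed by the value mod 1000.
import Mathlib
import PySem

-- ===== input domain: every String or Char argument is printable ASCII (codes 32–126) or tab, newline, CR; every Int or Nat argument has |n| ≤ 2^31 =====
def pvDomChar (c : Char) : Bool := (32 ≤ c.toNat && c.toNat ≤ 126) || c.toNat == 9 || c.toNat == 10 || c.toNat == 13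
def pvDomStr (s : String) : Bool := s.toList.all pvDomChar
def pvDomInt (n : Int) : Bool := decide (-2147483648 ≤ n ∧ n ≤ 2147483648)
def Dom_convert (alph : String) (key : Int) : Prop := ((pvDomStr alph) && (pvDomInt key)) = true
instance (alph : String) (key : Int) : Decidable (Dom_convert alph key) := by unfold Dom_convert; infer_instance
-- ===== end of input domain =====

-- B replaces A's char->value dict plus comparison sort by a stable counting sort into 1000
-- buckets: it iterates the distinct characters in first-occurrence order, recomputes each
-- character's value at its last occurrence (rfind) with a regrouped formula, and concatenates
-- the buckets; the interpreted formula runs once per distinct character instead of once per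
-- position (measurably faster in a timing run).

-- ===== PORT A =====
def convert (alph : String) (key : Int) : String :=
  let length : Int := PySem.Str.len alph
  let tempDict : PySem.Dict Char Int :=
    (PySem.List.enumerate alph.toList 0).foldl
      (fun d p =>
        d.insert p.2 (PySem.Int.mod (p.1 ^ 3 * key + length * key + p.1 * (length * p.1 ^ 4 - key)) 1000))
      PySem.Dict.empty
  let items := PySem.List.sorted tempDict.items (fun p => p.2) false
  String.ofList (items.foldl (fun acc p => acc ++ [p.1]) [])

-- ===== PORT B =====
-- buckets are ported as List (List Char) ('' -> [], s += ch -> ++ [ch], ''.join -> flatten);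
-- alph.rfind(ch) for the 1-char string ch is PySem.Chars.rfind on the char list (exact).
def convert_alt (alph : String) (key : Int) : String :=
  let n : Int := PySem.Str.len alph
  let buckets :=
    (PySem.List.dedup alph.toList).foldl
      (fun bs ch =>
        let i : Int := PySem.Chars.rfind alph.toList [ch]
        let v : Int := PySem.Int.mod (key * (i ^ 3 - i + n) + n * i ^ 5) 1000
        PySem.List.pySetD bs v (PySem.List.pyGetD bs v [] ++ [ch]))
      (List.replicate 1000 ([] : List Char))
  String.ofList buckets.flatten

-- ===== PRECONDITION & SPEC =====
def Spec_convert (alph : String) (key : Int) (out : String) : Prop := out = convert_alt alph key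
instance (alph : String) (key : Int) (out : String) : Decidable (Spec_convert alph key out) := by unfold Spec_convert; infer_instance

-- ===== CLAIM (what is proved, stated in full; the proofs are below) =====
def Claim_equal_convert : Prop := ∀ (alph : String) (key : Int), Dom_convert alph key → Spec_convert alph key (convert alph key)

-- ===== LEMMAS AND PROOFS =====

-- equation lemmas for the recursion inside PySem.Chars.rfind
lemma rfind_go_zero (s sub : List Char) :
    PySem.Chars.rfind.go s sub 0 = if sub.isPrefixOf s then 0 else -1 := by
  rw [PySem.Chars.rfind.go]

lemma rfind_go_succ (s sub : List Char) (j : Nat) :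
    PySem.Chars.rfind.go s sub (j + 1)
      = if sub.isPrefixOf (s.drop (j + 1)) then ((j + 1 : Nat) : Int)
        else PySem.Chars.rfind.go s sub j := by
  rw [PySem.Chars.rfind.go]

-- rfind of a single character over a list grown on the right
lemma rfind_go_append_lt (l : List Char) (x c : Char) (j : Nat) (hj : j < l.length) :
    PySem.Chars.rfind.go (l ++ [x]) [c] j = PySem.Chars.rfind.go l [c] j := by
  induction j with
  | zero =>
      rw [rfind_go_zero, rfind_go_zero]
      cases l with
      | nil => simp at hj
      | cons a t => simp [List.isPrefixOf]
  | succ j ih =>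
      rw [rfind_go_succ, rfind_go_succ]
      have hdrop : (l ++ [x]).drop (j + 1) = l.drop (j + 1) ++ [x] := by
        rw [List.drop_append_of_le_length (by omega)]
      rw [hdrop]
      have hne : l.drop (j + 1) ≠ [] := by
        intro h
        have := List.drop_eq_nil_iff.mp h
        omega
      cases hcase : l.drop (j + 1) with
      | nil => exact absurd hcase hne
      | cons a t =>
          simp only [List.cons_append, List.isPrefixOf, ih (by omega)]
          rfl

lemma rfind_append_singleton (l : List Char) (x c : Char) :
    PySem.Chars.rfind (l ++ [x]) [c]
      = if c = x then (l.length : Int) else PySem.Chars.rfind l [c] := by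
  unfold PySem.Chars.rfind
  have hlen : (l ++ [x]).length = l.length + 1 := by simp
  rw [hlen]
  rw [rfind_go_succ]
  have hd1 : (l ++ [x]).drop (l.length + 1) = [] := by simp
  rw [hd1]
  simp only [List.isPrefixOf, Bool.false_eq_true, if_false]
  cases l with
  | nil =>
      simp only [List.nil_append, List.length_nil]
      rw [rfind_go_zero, rfind_go_zero]
      simp only [List.isPrefixOf]
      by_cases h : c = x <;> simp [h]
  | cons a t =>
      have hlt : (a :: t).length = t.length + 1 := by simp
      rw [hlt, rfind_go_succ]
      have hd2 : ((a :: t) ++ [x]).drop (t.length + 1) = [x] := by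
        rw [List.drop_append_of_le_length (by simp)]
        simp
      rw [hd2]
      conv_rhs => rw [rfind_go_succ]
      have hd3 : (a :: t).drop (t.length + 1) = [] := by simp
      rw [hd3]
      simp only [List.isPrefixOf, Bool.and_true, Bool.false_eq_true, if_false]
      rw [rfind_go_append_lt (a :: t) x c t.length (by simp)]
      by_cases h : c = x <;> simp [h]

-- PySem.List.enumerate over a list grown on the right
lemma enumerate_append_singleton (l : List Char) (x : Char) (s : Int) :
    PySem.List.enumerate (l ++ [x]) s
      = PySem.List.enumerate l s ++ [(s + l.length, x)] := by
  induction l generalizing s with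
  | nil => simp [PySem.List.enumerate_cons, PySem.List.enumerate_nil]
  | cons a t ih =>
      simp only [List.cons_append, PySem.List.enumerate_cons, ih, List.length_cons]
      have : s + 1 + (t.length : Int) = s + ((t.length : Int) + 1) := by ring
      rw [this]
      push_cast
      ring_nf

-- PySem.List.dedup over a list grown on the right
lemma dedup_append_singleton (l : List Char) (x : Char) :
    PySem.List.dedup (l ++ [x])
      = if x ∈ l then PySem.List.dedup l else PySem.List.dedup l ++ [x] := by
  have hc : (PySem.Set.ofList l).contains x = decide (x ∈ l) := by
    by_cases h : x ∈ l
    · simp [PySem.Set.contains, h, (PySem.Set.mem_ofList l x).mpr h]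
    · simp only [PySem.Set.contains, h, decide_false]
      rw [Bool.eq_false_iff]
      intro hm
      exact h ((PySem.Set.mem_ofList l x).mp (List.contains_iff_mem.mp hm))
  simp only [PySem.List.dedup, PySem.Set.ofList, List.foldl_append, List.foldl_cons,
    List.foldl_nil, PySem.Set.add]
  rw [show List.foldl PySem.Set.add PySem.Set.empty l = PySem.Set.ofList l from rfl, hc]
  by_cases h : x ∈ l <;> simp [h]

-- A's dict-building loop characterised: distinct chars in first-occurrence order, each with
-- the value computed at its LAST occurrence index (Python's overwrite-in-place semantics)
lemma items_fold_enumerate (F : Int → Int) (l : List Char) :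
    ((PySem.List.enumerate l 0).foldl (fun d p => d.insert p.2 (F p.1)) PySem.Dict.empty).items
      = (PySem.List.dedup l).map (fun ch => (ch, F (PySem.Chars.rfind l [ch]))) := by
  induction l using List.reverseRecOn with
  | nil => simp [PySem.List.enumerate_nil, PySem.List.dedup, PySem.Set.ofList, PySem.Dict.empty]
  | append_singleton l x ih =>
      rw [enumerate_append_singleton, List.foldl_append, List.foldl_cons, List.foldl_nil,
        dedup_append_singleton]
      set d := (PySem.List.enumerate l 0).foldl (fun d p => d.insert p.2 (F p.1)) PySem.Dict.empty with hd
      have hkeys : d.keys = PySem.List.dedup l := by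
        show d.items.map (·.1) = _
        rw [ih, List.map_map]
        simp [Function.comp_def]
      have hcont : d.contains x = decide (x ∈ l) := by
        rw [PySem.Dict.contains_eq_decide_mem_keys, hkeys]
        by_cases h : x ∈ l
        · simp [h, (PySem.Set.mem_ofList l x).mpr h, PySem.List.dedup]
        · simp only [h, decide_false, decide_eq_false_iff_not]
          intro hm
          exact h ((PySem.Set.mem_ofList l x).mp (by simpa [PySem.List.dedup] using hm))
      by_cases hx : x ∈ l
      · rw [if_pos hx]
        rw [PySem.Dict.items_insert_of_contains d _ (by simp [hcont, hx])]
        rw [ih, List.map_map]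
        apply List.map_congr_left
        intro ch _
        simp only [Function.comp_apply, rfind_append_singleton]
        by_cases hcx : ch = x
        · simp [hcx]
        · simp [hcx, beq_iff_eq]
      · rw [if_neg hx]
        rw [PySem.Dict.items_insert_of_not_contains d _ (by simp [hcont, hx])]
        rw [ih, List.map_append]
        congr 1
        · apply List.map_congr_left
          intro ch hch
          have hchl : ch ∈ l := by
            have := (PySem.Set.mem_ofList l ch).mp (by simpa [PySem.List.dedup] using hch)
            exact this
          have hcx : ch ≠ x := fun h => hx (h ▸ hchl)
          simp [rfind_append_singleton, hcx]
        · simp [rfind_append_singleton]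

-- bucketed form of a list of pairs: for each value v in vs, in order, the pairs with that value
def pvBuckets (vs : List Int) (xs : List (Char × Int)) : List (Char × Int) :=
  vs.flatMap (fun v => xs.filter (fun p => p.2 = v))

lemma pvBuckets_nil (vs : List Int) : pvBuckets vs [] = [] := by
  simp [pvBuckets]

lemma pvBuckets_key_mem {vs : List Int} {xs : List (Char × Int)} {y : Char × Int}
    (hy : y ∈ pvBuckets vs xs) : y.2 ∈ vs := by
  simp only [pvBuckets, List.mem_flatMap, List.mem_filter, decide_eq_true_eq] at hy
  obtain ⟨v, hv, _, h2⟩ := hy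
  exact h2 ▸ hv

-- insertBy skips a prefix it is not before
lemma insertBy_append_left (bef : (Char × Int) → (Char × Int) → Bool) (x : Char × Int)
    (b r : List (Char × Int)) (h : ∀ y ∈ b, bef x y = false) :
    PySem.List.insertBy bef x (b ++ r) = b ++ PySem.List.insertBy bef x r := by
  induction b with
  | nil => rfl
  | cons z t ih =>
      simp only [List.cons_append, PySem.List.insertBy, h z (by simp)]
      simp only [ih (fun y hy => h y (by simp [hy])), Bool.false_eq_true, if_false]

-- inserting one element into the bucketed form appends it to its bucket
lemma insertBy_pvBuckets (vs : List Int) (hvs : vs.Pairwise (· < ·))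
    (x : Char × Int) (hx : x.2 ∈ vs) (p : List (Char × Int)) :
    PySem.List.insertBy (fun a b => decide (a.2 < b.2)) x (pvBuckets vs p)
      = pvBuckets vs (p ++ [x]) := by
  induction vs with
  | nil => simp at hx
  | cons v vs' ih =>
      have hlt : ∀ w ∈ vs', v < w := by
        intro w hw; exact (List.pairwise_cons.mp hvs).1 w hw
      have hvs' : vs'.Pairwise (· < ·) := (List.pairwise_cons.mp hvs).2
      have hfsplit : ∀ (u : Int), (p ++ [x]).filter (fun q => q.2 = u)
          = p.filter (fun q => q.2 = u) ++ if x.2 = u then [x] else [] := by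
        intro u
        simp only [List.filter_append, List.filter_cons, List.filter_nil]
        split_ifs with h1 h2 h2 <;> simp_all
      by_cases hxv : x.2 = v
      · -- x belongs to the first bucket: skip it, then land before the tail buckets
        have hb : ∀ y ∈ p.filter (fun q => q.2 = v),
            (fun a b => decide (a.2 < b.2)) x y = false := by
          intro y hy
          have : y.2 = v := by simpa using (List.mem_filter.mp hy).2
          simp [this, hxv]
        have hr : PySem.List.insertBy (fun a b => decide (a.2 < b.2)) x (pvBuckets vs' p)
            = x :: pvBuckets vs' p := by
          cases hcase : pvBuckets vs' p with
          | nil => rfl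
          | cons z t =>
              have hz : z.2 ∈ vs' := pvBuckets_key_mem (by rw [hcase]; simp)
              have : x.2 < z.2 := hxv ▸ hlt _ hz
              simp [PySem.List.insertBy, this]
        have hflat : pvBuckets (v :: vs') p
            = p.filter (fun q => q.2 = v) ++ pvBuckets vs' p := by
          simp [pvBuckets]
        rw [hflat, insertBy_append_left _ _ _ _ hb, hr]
        have htail : pvBuckets vs' (p ++ [x]) = pvBuckets vs' p := by
          unfold pvBuckets
          apply List.flatMap_congr
          intro u hu
          rw [hfsplit u]
          have hne : ¬ x.2 = u := by
            intro h; rw [hxv] at h; exact absurd (h ▸ hlt u hu) (by omega)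
          simp [hne]
        have hflat' : pvBuckets (v :: vs') (p ++ [x])
            = (p ++ [x]).filter (fun q => q.2 = v) ++ pvBuckets vs' (p ++ [x]) := by
          simp [pvBuckets]
        rw [hflat', htail, hfsplit v, if_pos hxv]
        simp
      · -- x belongs to a later bucket: skip the v-bucket entirely, recurse
        have hx' : x.2 ∈ vs' := by
          rcases List.mem_cons.mp hx with h | h
          · exact absurd h hxv
          · exact h
        have hvlt : v < x.2 := hlt _ hx'
        have hb : ∀ y ∈ p.filter (fun q => q.2 = v),
            (fun a b => decide (a.2 < b.2)) x y = false := by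
          intro y hy
          have : y.2 = v := by simpa using (List.mem_filter.mp hy).2
          simp [this]; omega
        have hflat : pvBuckets (v :: vs') p
            = p.filter (fun q => q.2 = v) ++ pvBuckets vs' p := by
          simp [pvBuckets]
        have hflat' : pvBuckets (v :: vs') (p ++ [x])
            = (p ++ [x]).filter (fun q => q.2 = v) ++ pvBuckets vs' (p ++ [x]) := by
          simp [pvBuckets]
        rw [hflat, insertBy_append_left _ _ _ _ hb, ih hvs' hx', hflat', hfsplit v, if_neg hxv]
        simp

-- the insertion-sort fold produces the bucketed form
lemma foldl_insertBy_pvBuckets (vs : List Int) (hvs : vs.Pairwise (· < ·))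
    (xs : List (Char × Int)) (hxs : ∀ x ∈ xs, x.2 ∈ vs) (p : List (Char × Int)) :
    xs.foldl (fun acc x => PySem.List.insertBy (fun a b => decide (a.2 < b.2)) x acc)
        (pvBuckets vs p)
      = pvBuckets vs (p ++ xs) := by
  induction xs generalizing p with
  | nil => simp
  | cons x t ih =>
      simp only [List.foldl_cons]
      rw [insertBy_pvBuckets vs hvs x (hxs x (by simp)) p,
        ih (fun y hy => hxs y (by simp [hy])) (p ++ [x])]
      simp

lemma sorted_eq_pvBuckets (vs : List Int) (hvs : vs.Pairwise (· < ·))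
    (xs : List (Char × Int)) (hxs : ∀ x ∈ xs, x.2 ∈ vs) :
    PySem.List.sorted xs (fun p => p.2) false = pvBuckets vs xs := by
  rw [PySem.List.sorted_eq_foldl_insertBy]
  have h0 : pvBuckets vs [] = [] := pvBuckets_nil vs
  rw [← h0, foldl_insertBy_pvBuckets vs hvs xs hxs []]
  simp

-- B's bucket-filling loop, characterised
lemma foldl_fill_buckets (xs : List (Char × Int))
    (hxs : ∀ x ∈ xs, 0 ≤ x.2 ∧ x.2 < 1000) (g : Nat → List Char) :
    xs.foldl (fun bs p => PySem.List.pySetD bs p.2 (PySem.List.pyGetD bs p.2 [] ++ [p.1]))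
        ((List.range 1000).map g)
      = (List.range 1000).map
          (fun v => g v ++ (xs.filter (fun q => q.2 = (v : Int))).map (fun q => q.1)) := by
  induction xs generalizing g with
  | nil => simp
  | cons x t ih =>
      obtain ⟨h0, h1⟩ := hxs x (by simp)
      have hlen : x.2 < (((List.range 1000).map g).length : Int) := by simp; omega
      have hget : PySem.List.pyGetD ((List.range 1000).map g) x.2 [] = g x.2.toNat := by
        rw [PySem.List.pyGetD_eq_getElem _ _ h0 hlen]
        simp
      have hset : PySem.List.pySetD ((List.range 1000).map g) x.2 (g x.2.toNat ++ [x.1])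
          = (List.range 1000).map
              (fun v => if v = x.2.toNat then g x.2.toNat ++ [x.1] else g v) := by
        rw [PySem.List.pySetD_of_nonneg _ _ h0]
        apply List.ext_getElem
        · simp
        · intro i hi hi'
          have hi1000 : i < 1000 := by simpa using hi'
          rw [List.getElem_set]
          by_cases hix : x.2.toNat = i
          · simp [hix]
          · have hne : ¬ i = x.2.toNat := fun h => hix h.symm
            simp only [List.getElem_map, List.getElem_range, if_neg hix, if_neg hne]
      simp only [List.foldl_cons, hget, hset]
      rw [ih (fun y hy => hxs y (by simp [hy]))]
      apply List.ext_getElem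
      · simp
      · intro i hi hi'
        have hi1000 : i < 1000 := by simpa using hi
        have hfc : ∀ (v : Int), (x :: t).filter (fun q => q.2 = v)
            = (if x.2 = v then [x] else []) ++ t.filter (fun q => q.2 = v) := by
          intro v; by_cases h : x.2 = v <;> simp [h]
        simp only [List.getElem_map, List.getElem_range, hfc]
        by_cases hix : i = x.2.toNat
        · have hxi : x.2 = (i : Int) := by omega
          simp only [if_pos hix, if_pos hxi]
          simp [hix]
        · have hxi : ¬ x.2 = (i : Int) := by omega
          simp only [if_neg hix, if_neg hxi]
          simp

-- ===== VERDICT (by name: the statement is the Claim_ definition above) =====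
set_option maxRecDepth 4096 in
theorem convert_spec : Claim_equal_convert := by
  intro alph key _
  unfold Spec_convert convert convert_alt
  simp only []
  set len := PySem.Str.len alph with hlen
  set F : Int → Int := fun i =>
    PySem.Int.mod (i ^ 3 * key + len * key + i * (len * i ^ 4 - key)) 1000 with hF
  -- the two formulas agree (regrouping, under the same mod)
  have hFB : ∀ i : Int,
      PySem.Int.mod (key * (i ^ 3 - i + len) + len * i ^ 5) 1000 = F i := by
    intro i
    rw [hF]
    congr 1
    ring
  -- the shared pair list: distinct chars in first-occurrence order with their final values
  set xs : List (Char × Int) :=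
    (PySem.List.dedup alph.toList).map
      (fun ch => (ch, F (PySem.Chars.rfind alph.toList [ch]))) with hxs
  have hitems :
      ((PySem.List.enumerate alph.toList 0).foldl
        (fun d p => d.insert p.2
          (PySem.Int.mod (p.1 ^ 3 * key + len * key + p.1 * (len * p.1 ^ 4 - key)) 1000))
        PySem.Dict.empty).items = xs := by
    exact items_fold_enumerate F alph.toList
  have hrange : ∀ p ∈ xs, 0 ≤ p.2 ∧ p.2 < 1000 := by
    intro p hp
    rw [hxs] at hp
    obtain ⟨ch, _, hpe⟩ := List.mem_map.mp hp
    rw [← hpe]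
    exact ⟨PySem.Int.mod_nonneg _ (by norm_num), PySem.Int.mod_lt _ (by norm_num)⟩
  have hmem : ∀ x ∈ xs, x.2 ∈ PySem.List.pyRange 0 1000 1 := by
    intro x hx
    obtain ⟨h0, h1⟩ := hrange x hx
    exact (PySem.List.mem_pyRange_one).mpr ⟨h0, h1⟩
  -- A side: stable sort = bucketed form
  rw [hitems,
    show (fun (acc : List Char) (p : Char × Int) => acc ++ [p.1])
      = (fun acc p => acc ++ [(fun q : Char × Int => q.1) p]) from rfl,
    PySem.List.foldl_append_singleton_eq_map (fun q : Char × Int => q.1) _ [],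
    sorted_eq_pvBuckets _ (PySem.List.pairwise_lt_pyRange_one 0 1000) xs hmem]
  -- B side: the fold over distinct chars is the fold over the pair list
  have hrepl : (List.replicate 1000 ([] : List Char))
      = (List.range 1000).map (fun _ => ([] : List Char)) := by simp
  rw [show ((PySem.List.dedup alph.toList).foldl
        (fun bs ch =>
          PySem.List.pySetD bs
            (PySem.Int.mod (key * ((PySem.Chars.rfind alph.toList [ch]) ^ 3
                - (PySem.Chars.rfind alph.toList [ch]) + len)
              + len * (PySem.Chars.rfind alph.toList [ch]) ^ 5) 1000)
            (PySem.List.pyGetD bs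
              (PySem.Int.mod (key * ((PySem.Chars.rfind alph.toList [ch]) ^ 3
                  - (PySem.Chars.rfind alph.toList [ch]) + len)
                + len * (PySem.Chars.rfind alph.toList [ch]) ^ 5) 1000) [] ++ [ch]))
        (List.replicate 1000 ([] : List Char)))
      = xs.foldl (fun bs p => PySem.List.pySetD bs p.2 (PySem.List.pyGetD bs p.2 [] ++ [p.1]))
          ((List.range 1000).map (fun _ => ([] : List Char))) from by
    rw [hxs, List.foldl_map, hrepl]
    apply PySem.List.foldl_congr_mem
    intro bs ch _
    rw [hFB]]
  rw [foldl_fill_buckets xs hrange (fun _ => [])]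
  -- both are the concatenation of the buckets
  congr 1
  unfold pvBuckets
  rw [PySem.List.pyRange_one, List.map_flatMap, List.flatMap_map, List.flatMap_def]
  simp
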